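-- pv_equiv track=rewrite | github.com/Xuanma0/Project-Be-your-eyes | Gateway/byes/mapping/costmap.py | _dilate_u8_grid
-- ===== SOURCE A (Python) =====
-- def _dilate_u8_grid(values: list[int], width: int, height: int) -> list[int]:
--     if width <= 0 or height <= 0 or not values:
--         return values
--     src = list(values)
--     out = list(src)
--     for y in range(height):
--         for x in range(width):
--             max_v = src[y * width + x]
--             for ny in range(max(0, y - 1), min(height, y + 2)):
--                 for nx in range(max(0, x - 1), min(width, x + 2)):
--                     neighbor = src[ny * width + nx]
--                     if neighbor > max_v:
--                         max_v = neighbor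
--             out[y * width + x] = int(max_v)
--     return out
-- ===== SOURCE B (Python) =====
-- def _dilate_u8_grid(values: list[int], width: int, height: int) -> list[int]:
--     if width <= 0 or height <= 0 or not values:
--         return values
--     src = list(values)
--     # pass 1: horizontal 1D max (clamped window [x-1, x+1])
--     horiz = list(src)
--     for y in range(height):
--         for x in range(width):
--             horiz[y * width + x] = max(src[y * width + nx]
--                                        for nx in range(max(0, x - 1), min(width, x + 2)))
--     # pass 2: vertical 1D max of the horizontal maxima
--     out = list(horiz)
--     for y in range(height):
--         for x in range(width):
--             out[y * width + x] = int(max(horiz[ny * width + x]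
--                                          for ny in range(max(0, y - 1), min(height, y + 2))))
--     return out
-- ===== Notes on version B (the rewrite author's own statement) =====
-- stated objective: alternative
-- what changed: Replaces the single pass with a per-cell 3x3 neighborhood scan by a separable two-pass filter: a horizontal 1D running max into an intermediate array, then a vertical 1D max over that array (6 window reads per cell instead of 9).
import Mathlib
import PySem

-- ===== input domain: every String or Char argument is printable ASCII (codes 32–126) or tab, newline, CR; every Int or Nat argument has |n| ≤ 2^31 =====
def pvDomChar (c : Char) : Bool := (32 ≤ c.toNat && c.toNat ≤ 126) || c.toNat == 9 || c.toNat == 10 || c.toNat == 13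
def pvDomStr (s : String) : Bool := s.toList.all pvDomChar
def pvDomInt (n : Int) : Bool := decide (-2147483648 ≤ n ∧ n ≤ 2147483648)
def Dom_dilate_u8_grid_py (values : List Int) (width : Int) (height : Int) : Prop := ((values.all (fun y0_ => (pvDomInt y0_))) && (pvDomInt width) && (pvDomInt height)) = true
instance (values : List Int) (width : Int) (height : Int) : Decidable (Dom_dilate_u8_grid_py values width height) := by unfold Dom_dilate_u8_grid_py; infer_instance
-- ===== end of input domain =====

-- B replaces A's per-cell 3x3 scan by a separable two-pass (horizontal then vertical 1D max) filter; same results, different algorithm.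

-- ===== PORT A =====
def dilate_u8_grid_py (values : List Int) (width : Int) (height : Int) : List Int :=
  if width ≤ 0 ∨ height ≤ 0 ∨ values = [] then values
  else
    (PySem.List.pyRange 0 height 1).foldl (fun out y =>
      (PySem.List.pyRange 0 width 1).foldl (fun out x =>
        PySem.List.pySetD out (y * width + x)
          ((PySem.List.pyRange (max 0 (y - 1)) (min height (y + 2)) 1).foldl (fun m ny =>
            (PySem.List.pyRange (max 0 (x - 1)) (min width (x + 2)) 1).foldl (fun m nx =>
              let neighbor := PySem.List.pyGetD values (ny * width + nx) 0
              if neighbor > m then neighbor else m) m)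
            (PySem.List.pyGetD values (y * width + x) 0))) out) values

-- ===== PORT B =====
def dilate_u8_grid_py_alt (values : List Int) (width : Int) (height : Int) : List Int :=
  if width ≤ 0 ∨ height ≤ 0 ∨ values = [] then values
  else
    let horiz := (PySem.List.pyRange 0 height 1).foldl (fun acc y =>
      (PySem.List.pyRange 0 width 1).foldl (fun acc x =>
        PySem.List.pySetD acc (y * width + x)
          ((PySem.List.max? ((PySem.List.pyRange (max 0 (x - 1)) (min width (x + 2)) 1).map
              (fun nx => PySem.List.pyGetD values (y * width + nx) 0)) (fun v => v)).getD 0)) acc) values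
    (PySem.List.pyRange 0 height 1).foldl (fun acc y =>
      (PySem.List.pyRange 0 width 1).foldl (fun acc x =>
        PySem.List.pySetD acc (y * width + x)
          ((PySem.List.max? ((PySem.List.pyRange (max 0 (y - 1)) (min height (y + 2)) 1).map
              (fun ny => PySem.List.pyGetD horiz (ny * width + x) 0)) (fun v => v)).getD 0)) acc) horiz

-- ===== PRECONDITION & SPEC =====
-- Pre_ excludes exactly the inputs where A raises IndexError: the guard is passed but values is
-- shorter than width*height (B raises there too).
def Pre_dilate_u8_grid_py (values : List Int) (width : Int) (height : Int) : Prop :=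
  width ≤ 0 ∨ height ≤ 0 ∨ values = [] ∨ width * height ≤ (values.length : Int)
instance (values : List Int) (width : Int) (height : Int) : Decidable (Pre_dilate_u8_grid_py values width height) := by unfold Pre_dilate_u8_grid_py; infer_instance

def pvWitness_dilate_u8_grid_py : List Int × Int × Int := ([1, 9, 3, 4, 5, 6], 3, 2)

def Spec_dilate_u8_grid_py (values : List Int) (width : Int) (height : Int) (out : List Int) : Prop := out = dilate_u8_grid_py_alt values width height
instance (values : List Int) (width : Int) (height : Int) (out : List Int) : Decidable (Spec_dilate_u8_grid_py values width height out) := by unfold Spec_dilate_u8_grid_py; infer_instance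

-- ===== CLAIM (what is proved, stated in full; the proofs are below) =====
def Claim_equal_dilate_u8_grid_py : Prop := ∀ (values : List Int) (width : Int) (height : Int), Dom_dilate_u8_grid_py values width height → Pre_dilate_u8_grid_py values width height → Spec_dilate_u8_grid_py values width height (dilate_u8_grid_py values width height)

-- ===== LEMMAS AND PROOFS =====

-- generic length preservation of a foldl whose step preserves length
theorem pvFoldlLen {α : Type} (l : List α) (F : List Int → α → List Int)
    (h : ∀ M t, (F M t).length = M.length) (M : List Int) :
    (l.foldl F M).length = M.length := by
  induction l generalizing M with
  | nil => rfl
  | cons a t ih => simp only [List.foldl_cons]; rw [ih, h]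

-- one row of writes: positions base+a, …, base+w-1 get g(x)
def pvRowF (g : Int → Int) (base w a : Int) (M : List Int) : List Int :=
  (PySem.List.pyRange a w 1).foldl (fun acc x => PySem.List.pySetD acc (base + x) (g x)) M

theorem pvRowF_length (g : Int → Int) (base w a : Int) (M : List Int) :
    (pvRowF g base w a M).length = M.length := by
  exact pvFoldlLen _ _ (fun M t => PySem.List.length_pySetD ..) M

theorem pvRowF_get_aux (g : Int → Int) (base w : Int) : ∀ (n : Nat) (a : Int) (M : List Int),
    (w - a).toNat ≤ n → 0 ≤ base → 0 ≤ a → base + w ≤ (M.length : Int) → ∀ i : Int, 0 ≤ i →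
    PySem.List.pyGetD (pvRowF g base w a M) i 0 =
      if base + a ≤ i ∧ i < base + w then g (i - base) else PySem.List.pyGetD M i 0 := by
  intro n
  induction n with
  | zero =>
    intro a M hn hb ha hw i hi
    rw [pvRowF, PySem.List.pyRange_one_eq_nil (by omega), List.foldl_nil, if_neg (by omega)]
  | succ n ih =>
    intro a M hn hb ha hw i hi
    rcases le_or_gt w a with hwa | hwa
    · rw [pvRowF, PySem.List.pyRange_one_eq_nil (by omega), List.foldl_nil, if_neg (by omega)]
    · rw [pvRowF, PySem.List.pyRange_one_cons hwa, List.foldl_cons]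
      have hrec := ih (a + 1) (PySem.List.pySetD M (base + a) (g a)) (by omega) hb (by omega)
        (by rw [PySem.List.length_pySetD]; exact hw) i hi
      rw [show ((PySem.List.pyRange (a + 1) w 1).foldl
            (fun acc x => PySem.List.pySetD acc (base + x) (g x))
            (PySem.List.pySetD M (base + a) (g a))) =
          pvRowF g base w (a + 1) (PySem.List.pySetD M (base + a) (g a)) from rfl, hrec]
      have hset : PySem.List.pyGetD (PySem.List.pySetD M (base + a) (g a)) i 0 =
          if i = base + a then g a else PySem.List.pyGetD M i 0 := by
        have hbn : base + a = (((base + a).toNat : Nat) : Int) := by omega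
        have hin : i = ((i.toNat : Nat) : Int) := by omega
        rw [hbn, hin, PySem.List.pyGetD_pySetD_natCast M ((base + a).toNat) i.toNat (g a) 0 (by omega)]
        by_cases h2 : i.toNat = (base + a).toNat
        · rw [if_pos h2, if_pos (by omega)]
        · rw [if_neg h2, if_neg (by omega), ← hin]
      by_cases h1 : base + (a + 1) ≤ i ∧ i < base + w
      · rw [if_pos h1, if_pos (by omega)]
      · rw [if_neg h1, hset]
        by_cases h2 : i = base + a
        · rw [if_pos h2, if_pos (by omega), h2]
          congr 1
          omega
        · rw [if_neg h2, if_neg (by omega)]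

theorem pvRowF_get (g : Int → Int) (base w a : Int) (M : List Int)
    (hb : 0 ≤ base) (ha : 0 ≤ a) (hw : base + w ≤ (M.length : Int)) (i : Int) (hi : 0 ≤ i) :
    PySem.List.pyGetD (pvRowF g base w a M) i 0 =
      if base + a ≤ i ∧ i < base + w then g (i - base) else PySem.List.pyGetD M i 0 :=
  pvRowF_get_aux g base w (w - a).toNat a M le_rfl hb ha hw i hi

-- the double loop writing f y x at y*w+x, rows b..h-1
def pvGridF (f : Int → Int → Int) (w h b : Int) (L : List Int) : List Int :=
  (PySem.List.pyRange b h 1).foldl (fun acc y => pvRowF (f y) (y * w) w 0 acc) L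

theorem pvGridF_length (f : Int → Int → Int) (w h b : Int) (L : List Int) :
    (pvGridF f w h b L).length = L.length := by
  exact pvFoldlLen _ _ (fun M t => pvRowF_length ..) L

theorem pvGridF_get_aux (f : Int → Int → Int) (w h : Int) (hw : 0 < w) : ∀ (n : Nat) (b : Int) (L : List Int),
    (h - b).toNat ≤ n → 0 ≤ b → h * w ≤ (L.length : Int) →
    (∀ i : Int, 0 ≤ i → i < b * w → PySem.List.pyGetD (pvGridF f w h b L) i 0 = PySem.List.pyGetD L i 0) ∧
    (∀ y x : Int, b ≤ y → y < h → 0 ≤ x → x < w →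
      PySem.List.pyGetD (pvGridF f w h b L) (y * w + x) 0 = f y x) ∧
    (∀ i : Int, h * w ≤ i → PySem.List.pyGetD (pvGridF f w h b L) i 0 = PySem.List.pyGetD L i 0) := by
  intro n
  induction n with
  | zero =>
    intro b L hn hb hL
    rw [pvGridF, PySem.List.pyRange_one_eq_nil (by omega), List.foldl_nil]
    exact ⟨fun _ _ _ => rfl, fun y x h1 h2 _ _ => (by omega : False).elim, fun _ _ => rfl⟩
  | succ n ih =>
    intro b L hn hb hL
    rcases le_or_gt h b with hhb | hbh
    · rw [pvGridF, PySem.List.pyRange_one_eq_nil (by omega), List.foldl_nil]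
      exact ⟨fun _ _ _ => rfl, fun y x h1 h2 _ _ => (by omega : False).elim, fun _ _ => rfl⟩
    · have hkey : b * w + w ≤ h * w := by
        nlinarith [mul_nonneg (by omega : (0:Int) ≤ h - (b + 1)) (le_of_lt hw)]
      have hbw : 0 ≤ b * w := mul_nonneg hb (le_of_lt hw)
      rw [pvGridF, PySem.List.pyRange_one_cons hbh, List.foldl_cons]
      rw [show ((PySem.List.pyRange (b + 1) h 1).foldl (fun acc y => pvRowF (f y) (y * w) w 0 acc)
            (pvRowF (f b) (b * w) w 0 L)) = pvGridF f w h (b + 1) (pvRowF (f b) (b * w) w 0 L) from rfl]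
      have hlenM : (pvRowF (f b) (b * w) w 0 L).length = L.length := pvRowF_length ..
      have hrow : ∀ i : Int, 0 ≤ i → PySem.List.pyGetD (pvRowF (f b) (b * w) w 0 L) i 0 =
          if b * w + 0 ≤ i ∧ i < b * w + w then f b (i - b * w) else PySem.List.pyGetD L i 0 :=
        fun i hi => pvRowF_get (f b) (b * w) w 0 L hbw le_rfl (by omega) i hi
      obtain ⟨IA, IB, IC⟩ := ih (b + 1) (pvRowF (f b) (b * w) w 0 L) (by omega) (by omega)
        (by rw [hlenM]; exact hL)
      refine ⟨?_, ?_, ?_⟩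
      · intro i hi hibw
        rw [IA i hi (by nlinarith), hrow i hi, if_neg (by omega)]
      · intro y x hby hyh hx0 hxw
        by_cases hyb : y = b
        · subst hyb
          have h1 : (0:Int) ≤ y * w + x := by positivity
          rw [IA (y * w + x) h1 (by nlinarith), hrow (y * w + x) h1, if_pos (by omega)]
          congr 1
          omega
        · exact IB y x (by omega) hyh hx0 hxw
      · intro i hhw
        have hi : 0 ≤ i := by omega
        rw [IC i hhw, hrow i hi, if_neg (by omega)]

-- foldl over a flatMap is the nested foldl
theorem pvFoldlFlatMap {α β σ : Type} (l : List α) (F : α → List β) (g : σ → β → σ) (init : σ) :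
    (l.flatMap F).foldl g init = l.foldl (fun s a => (F a).foldl g s) init := by
  induction l generalizing init with
  | nil => rfl
  | cons a t ih => simp only [List.flatMap_cons, List.foldl_append, List.foldl_cons, ih]

theorem pvIfGtFold (l : List Int) (u : Int → Int) : ∀ m : Int,
    l.foldl (fun m nx => if u nx > m then u nx else m) m = (l.map u).foldl max m := by
  induction l with
  | nil => intro m; rfl
  | cons a t ih =>
    intro m
    simp only [List.foldl_cons, List.map_cons, ih]
    congr 1
    by_cases h : u a > m
    · rw [if_pos h, max_eq_right (le_of_lt h)]
    · rw [if_neg h, max_eq_left (by omega)]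

-- the heart: the 3x3 running max equals max-of-row-maxima (any nonempty index lists)
theorem pvNestedMax (ys xs : List Int) (v : Int → Int → Int) (y x : Int)
    (hy : y ∈ ys) (hx : x ∈ xs) :
    ys.foldl (fun m ny => xs.foldl (fun m nx => if v ny nx > m then v ny nx else m) m) (v y x)
    = (PySem.List.max? (ys.map (fun ny => (PySem.List.max? (xs.map (v ny)) (fun a => a)).getD 0))
        (fun a => a)).getD 0 := by
  obtain ⟨yh, yt, rfl⟩ := List.exists_cons_of_ne_nil (List.ne_nil_of_mem hy)
  obtain ⟨xh, xt, rfl⟩ := List.exists_cons_of_ne_nil (List.ne_nil_of_mem hx)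
  have hstep : (fun (m ny : Int) =>
      (xh :: xt).foldl (fun m nx => if v ny nx > m then v ny nx else m) m) =
      (fun (m ny : Int) => ((xh :: xt).map (v ny)).foldl max m) :=
    funext fun m => funext fun ny => pvIfGtFold (xh :: xt) (v ny) m
  rw [hstep, ← pvFoldlFlatMap (yh :: yt) (fun ny => (xh :: xt).map (v ny)) max (v y x)]
  have hrm : ∀ ny : Int, (PySem.List.max? ((xh :: xt).map (v ny)) (fun a => a)).getD 0 =
      (xt.map (v ny)).foldl max (v ny xh) := by
    intro ny
    rw [List.map_cons, PySem.List.max?_id_cons, Option.getD_some]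
  rw [show ((yh :: yt).map (fun ny =>
        (PySem.List.max? ((xh :: xt).map (v ny)) (fun a => a)).getD 0)) =
      (yh :: yt).map (fun ny => (xt.map (v ny)).foldl max (v ny xh)) from
    List.map_congr_left (fun ny _ => hrm ny)]
  rw [List.map_cons, PySem.List.max?_id_cons, Option.getD_some]
  -- abbreviations
  have hrm_mem : ∀ ny : Int, (xt.map (v ny)).foldl max (v ny xh) ∈ (xh :: xt).map (v ny) := by
    intro ny
    rw [List.map_cons]
    rcases PySem.List.foldl_max_mem (xt.map (v ny)) (v ny xh) with h | h
    · rw [h]; exact List.mem_cons_self ..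
    · exact List.mem_cons_of_mem _ h
  have hrm_ub : ∀ (ny z : Int), z ∈ (xh :: xt).map (v ny) →
      z ≤ (xt.map (v ny)).foldl max (v ny xh) := by
    intro ny z hz
    rw [List.map_cons, List.mem_cons] at hz
    rcases hz with h | h
    · rw [h]; exact (PySem.List.le_foldl_max _ _).1
    · exact (PySem.List.le_foldl_max _ _).2 z h
  have hS_ub : ∀ z ∈ ((yh :: yt).flatMap fun ny => (xh :: xt).map (v ny)),
      z ≤ ((yh :: yt).flatMap fun ny => (xh :: xt).map (v ny)).foldl max (v y x) :=
    (PySem.List.le_foldl_max _ _).2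
  have hT_ub : ∀ ny ∈ yh :: yt, (xt.map (v ny)).foldl max (v ny xh) ≤
      (yt.map fun ny => (xt.map (v ny)).foldl max (v ny xh)).foldl max
        ((xt.map (v yh)).foldl max (v yh xh)) := by
    intro ny hny
    rcases List.mem_cons.mp hny with h | h
    · rw [h]; exact (PySem.List.le_foldl_max _ _).1
    · exact (PySem.List.le_foldl_max _ _).2 _ (List.mem_map_of_mem h)
  apply le_antisymm
  · have hSmem : ((yh :: yt).flatMap fun ny => (xh :: xt).map (v ny)).foldl max (v y x) ∈
        ((yh :: yt).flatMap fun ny => (xh :: xt).map (v ny)) := by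
      rcases PySem.List.foldl_max_mem ((yh :: yt).flatMap fun ny => (xh :: xt).map (v ny)) (v y x)
        with h | h
      · rw [h]; exact List.mem_flatMap.mpr ⟨y, hy, List.mem_map_of_mem hx⟩
      · exact h
    obtain ⟨ny, hny, hrow⟩ := List.mem_flatMap.mp hSmem
    exact le_trans (hrm_ub ny _ hrow) (hT_ub ny hny)
  · have hTmem : ∃ ny ∈ yh :: yt,
        (yt.map fun ny => (xt.map (v ny)).foldl max (v ny xh)).foldl max
          ((xt.map (v yh)).foldl max (v yh xh)) = (xt.map (v ny)).foldl max (v ny xh) := by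
      rcases PySem.List.foldl_max_mem (yt.map fun ny => (xt.map (v ny)).foldl max (v ny xh))
        ((xt.map (v yh)).foldl max (v yh xh)) with h | h
      · exact ⟨yh, List.mem_cons_self .., h⟩
      · obtain ⟨ny, hny, hval⟩ := List.mem_map.mp h
        exact ⟨ny, List.mem_cons_of_mem _ hny, hval.symm⟩
    obtain ⟨ny, hny, hTe⟩ := hTmem
    rw [hTe]
    exact hS_ub _ (List.mem_flatMap.mpr ⟨ny, hny, hrm_mem ny⟩)

theorem pvCellEq (src : List Int) (w h : Int) (y x : Int)
    (hy0 : 0 ≤ y) (hyh : y < h) (hx0 : 0 ≤ x) (hxw : x < w) (horiz : List Int)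
    (hhz : ∀ ny : Int, 0 ≤ ny → ny < h →
      PySem.List.pyGetD horiz (ny * w + x) 0 =
        (PySem.List.max? ((PySem.List.pyRange (max 0 (x - 1)) (min w (x + 2)) 1).map
          (fun nx => PySem.List.pyGetD src (ny * w + nx) 0)) (fun v => v)).getD 0) :
    (PySem.List.pyRange (max 0 (y - 1)) (min h (y + 2)) 1).foldl (fun m ny =>
      (PySem.List.pyRange (max 0 (x - 1)) (min w (x + 2)) 1).foldl (fun m nx =>
        if PySem.List.pyGetD src (ny * w + nx) 0 > m then PySem.List.pyGetD src (ny * w + nx) 0 else m) m)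
      (PySem.List.pyGetD src (y * w + x) 0)
    = (PySem.List.max? ((PySem.List.pyRange (max 0 (y - 1)) (min h (y + 2)) 1).map
        (fun ny => PySem.List.pyGetD horiz (ny * w + x) 0)) (fun v => v)).getD 0 := by
  have hmapc : (PySem.List.pyRange (max 0 (y - 1)) (min h (y + 2)) 1).map
      (fun ny => PySem.List.pyGetD horiz (ny * w + x) 0) =
      (PySem.List.pyRange (max 0 (y - 1)) (min h (y + 2)) 1).map
      (fun ny => (PySem.List.max? ((PySem.List.pyRange (max 0 (x - 1)) (min w (x + 2)) 1).map
          (fun nx => PySem.List.pyGetD src (ny * w + nx) 0)) (fun v => v)).getD 0) := by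
    apply List.map_congr_left
    intro ny hmem
    rw [PySem.List.mem_pyRange_one] at hmem
    exact hhz ny (by omega) (by omega)
  rw [hmapc]
  exact pvNestedMax _ _ (fun ny nx => PySem.List.pyGetD src (ny * w + nx) 0) y x
    (by rw [PySem.List.mem_pyRange_one]; omega)
    (by rw [PySem.List.mem_pyRange_one]; omega)

theorem pvGetCast (R : List Int) (i : Nat) (h : i < R.length) :
    R[i] = PySem.List.pyGetD R (i : Int) 0 := by
  rw [PySem.List.pyGetD_natCast, List.getD_eq_getElem?_getD, List.getElem?_eq_getElem h,
    Option.getD_some]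

-- ===== VERDICT (by name: the statement is the Claim_ definition above) =====
theorem dilate_u8_grid_py_spec : Claim_equal_dilate_u8_grid_py := by
  intro values width height hdom hpre
  unfold Spec_dilate_u8_grid_py
  by_cases hg : width ≤ 0 ∨ height ≤ 0 ∨ values = []
  · rw [dilate_u8_grid_py, dilate_u8_grid_py_alt, if_pos hg, if_pos hg]
  · have hw : 0 < width := by by_contra h; exact hg (Or.inl (by omega))
    have hh : 0 < height := by by_contra h; exact hg (Or.inr (Or.inl (by omega)))
    have hne : values ≠ [] := fun h => hg (Or.inr (Or.inr h))
    have hlen : height * width ≤ (values.length : Int) := by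
      unfold Pre_dilate_u8_grid_py at hpre
      have hc : width * height = height * width := mul_comm width height
      rcases hpre with h | h | h | h
      · omega
      · omega
      · exact absurd h hne
      · omega
    have hgneg : ¬(width ≤ 0 ∨ height ≤ 0 ∨ values = []) := hg
    have hA : dilate_u8_grid_py values width height =
        pvGridF (fun y x =>
          (PySem.List.pyRange (max 0 (y - 1)) (min height (y + 2)) 1).foldl (fun m ny =>
            (PySem.List.pyRange (max 0 (x - 1)) (min width (x + 2)) 1).foldl (fun m nx =>
              if PySem.List.pyGetD values (ny * width + nx) 0 > m
              then PySem.List.pyGetD values (ny * width + nx) 0 else m) m)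
            (PySem.List.pyGetD values (y * width + x) 0)) width height 0 values := by
      rw [dilate_u8_grid_py, if_neg hgneg]
      rfl
    have hB : dilate_u8_grid_py_alt values width height =
        pvGridF (fun y x =>
          (PySem.List.max? ((PySem.List.pyRange (max 0 (y - 1)) (min height (y + 2)) 1).map
            (fun ny => PySem.List.pyGetD
              (pvGridF (fun y x =>
                (PySem.List.max? ((PySem.List.pyRange (max 0 (x - 1)) (min width (x + 2)) 1).map
                  (fun nx => PySem.List.pyGetD values (y * width + nx) 0)) (fun v => v)).getD 0)
                width height 0 values)
              (ny * width + x) 0)) (fun v => v)).getD 0) width height 0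
          (pvGridF (fun y x =>
            (PySem.List.max? ((PySem.List.pyRange (max 0 (x - 1)) (min width (x + 2)) 1).map
              (fun nx => PySem.List.pyGetD values (y * width + nx) 0)) (fun v => v)).getD 0)
            width height 0 values) := by
      rw [dilate_u8_grid_py_alt, if_neg hgneg]
      rfl
    rw [hA, hB]
    obtain ⟨_, GAhit, GAhigh⟩ := pvGridF_get_aux _ width height hw (height - 0).toNat 0 values
      le_rfl le_rfl hlen
    obtain ⟨_, H1hit, H1high⟩ := pvGridF_get_aux
      (fun y x => (PySem.List.max? ((PySem.List.pyRange (max 0 (x - 1)) (min width (x + 2)) 1).map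
        (fun nx => PySem.List.pyGetD values (y * width + nx) 0)) (fun v => v)).getD 0)
      width height hw (height - 0).toNat 0 values le_rfl le_rfl hlen
    obtain ⟨_, G2hit, G2high⟩ := pvGridF_get_aux _ width height hw (height - 0).toNat 0
      (pvGridF (fun y x =>
        (PySem.List.max? ((PySem.List.pyRange (max 0 (x - 1)) (min width (x + 2)) 1).map
          (fun nx => PySem.List.pyGetD values (y * width + nx) 0)) (fun v => v)).getD 0)
        width height 0 values)
      le_rfl le_rfl (by rw [pvGridF_length]; exact hlen)
    apply List.ext_getElem
    · rw [pvGridF_length, pvGridF_length, pvGridF_length]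
    · intro i h1 h2
      rw [pvGetCast _ i h1, pvGetCast _ i h2]
      by_cases hcase : (i : Int) < height * width
      · have hwn : (width.toNat : Int) = width := Int.toNat_of_nonneg (le_of_lt hw)
        have hxlt : i % width.toNat < width.toNat := Nat.mod_lt _ (by omega)
        have hdm := Nat.div_add_mod i width.toNat
        have hiyx : (i : Int) = ((i / width.toNat : Nat) : Int) * width +
            ((i % width.toNat : Nat) : Int) := by
          have h' : i = i / width.toNat * width.toNat + i % width.toNat :=
            (Nat.div_add_mod' i width.toNat).symm
          rw [← hwn]
          exact_mod_cast h'
        have hx0 : (0 : Int) ≤ ((i % width.toNat : Nat) : Int) := by positivity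
        have hxw : ((i % width.toNat : Nat) : Int) < width := by
          rw [← hwn]
          exact_mod_cast hxlt
        have hy0 : (0 : Int) ≤ ((i / width.toNat : Nat) : Int) := by positivity
        have hyh : ((i / width.toNat : Nat) : Int) < height := by
          by_contra hcon
          have hcon' : height ≤ ((i / width.toNat : Nat) : Int) := not_lt.mp hcon
          nlinarith
        rw [hiyx, GAhit _ _ hy0 hyh hx0 hxw, G2hit _ _ hy0 hyh hx0 hxw]
        exact pvCellEq values width height _ _ hy0 hyh hx0 hxw _
          (fun ny hny1 hny2 => H1hit ny _ hny1 hny2 hx0 hxw)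
      · rw [GAhigh (i : Int) (by omega), G2high (i : Int) (by omega), H1high (i : Int) (by omega)]
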